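-- pv_equiv track=rewrite | github.com/AlexG2024/aiarxiv | src/filters.py | _collect_hits
-- ===== SOURCE A (Python) =====
-- def _collect_hits(text: str, patterns: dict[str, int]) -> tuple[list[str], int]:
--     hits: list[str] = []
--     total = 0
--     for pattern, weight in patterns.items():
--         if pattern in text:
--             hits.append(pattern)
--             total += weight
--     return hits, total
-- ===== SOURCE B (Python) =====
-- def _collect_hits(text: str, patterns: dict[str, int]) -> tuple[list[str], int]:
--     # Index the text once per distinct pattern length: the set of all substrings
--     # of that length.  Each pattern is then a single set lookup; hits and the
--     # weight total are emitted in the dict's own order.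
--     subs_by_len: dict[int, set[str]] = {}
--     n = len(text)
--     for p in patterns:
--         L = len(p)
--         if L not in subs_by_len:
--             subs_by_len[L] = {text[i:i + L] for i in range(n - L + 1)}
--     hits = [p for p, _ in patterns.items() if p in subs_by_len[len(p)]]
--     total = sum(w for p, w in patterns.items() if p in subs_by_len[len(p)])
--     return hits, total
-- ===== Notes on version B (the rewrite author's own statement) =====
-- stated objective: faster
-- what changed: A scans the whole text once per pattern with 'pattern in text'; B builds, once per distinct pattern length L, the set of all length-L substrings of the text, turns each pattern test into a single set lookup, and emits hits and the weight total in the dict's own order.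
import Mathlib
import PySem

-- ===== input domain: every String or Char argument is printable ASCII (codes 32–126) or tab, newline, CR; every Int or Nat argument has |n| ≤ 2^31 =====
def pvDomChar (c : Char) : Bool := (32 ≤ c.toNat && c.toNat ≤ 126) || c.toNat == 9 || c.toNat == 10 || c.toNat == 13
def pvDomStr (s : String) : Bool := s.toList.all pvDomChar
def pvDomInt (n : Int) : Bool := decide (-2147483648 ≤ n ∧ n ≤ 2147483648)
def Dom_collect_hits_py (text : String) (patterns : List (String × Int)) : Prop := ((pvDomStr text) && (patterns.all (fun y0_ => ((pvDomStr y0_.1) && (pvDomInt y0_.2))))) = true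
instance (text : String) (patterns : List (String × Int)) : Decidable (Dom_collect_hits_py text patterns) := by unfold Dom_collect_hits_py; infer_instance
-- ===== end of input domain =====

-- B replaces per-pattern 'pattern in text' scans with a substring index built once per
-- distinct pattern length, then one set lookup per pattern (objective: faster).

-- ===== PORT A =====
def collect_hits_py (text : String) (patterns : List (String × Int)) : List String × Int :=
  patterns.foldl
    (fun (st : List String × Int) pw =>
      if PySem.Str.isIn pw.1 text then (st.1 ++ [pw.1], st.2 + pw.2) else st)
    ([], 0)

-- ===== PORT B =====
-- '{text[i:i+L] for i in range(n - L + 1)}': with 0 ≤ i ≤ n - L the slice is (drop i).take L;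
-- List.range (n + 1 - L) has exactly the indices of Python's range(n - L + 1) (empty when L > n)
def pvSubs (text : List Char) (L : Nat) : PySem.Set (List Char) :=
  PySem.Set.ofList ((List.range (text.length + 1 - L)).map (fun i => (text.drop i).take L))

-- the 'for p in patterns' loop filling subs_by_len
def pvIndex (text : List Char) (pats : List (List Char)) : PySem.Dict Nat (PySem.Set (List Char)) :=
  pats.foldl
    (fun d p => if d.contains p.length then d else d.insert p.length (pvSubs text p.length))
    PySem.Dict.empty

def collect_hits_py_alt (text : String) (patterns : List (String × Int)) : List String × Int :=
  let idx := pvIndex text.toList (patterns.map (fun pw => pw.1.toList))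
  -- 'p in subs_by_len[len(p)]': len(p) is always a key of the index, so the getD default is unreachable
  let hits := (patterns.filter
      (fun pw => (idx.getD pw.1.toList.length PySem.Set.empty).contains pw.1.toList)).map (fun pw => pw.1)
  let total := ((patterns.filter
      (fun pw => (idx.getD pw.1.toList.length PySem.Set.empty).contains pw.1.toList)).map (fun pw => pw.2)).sum
  (hits, total)

-- ===== PRECONDITION & SPEC =====
def Spec_collect_hits_py (text : String) (patterns : List (String × Int)) (out : List String × Int) : Prop := out = collect_hits_py_alt text patterns
instance (text : String) (patterns : List (String × Int)) (out : List String × Int) : Decidable (Spec_collect_hits_py text patterns out) := by unfold Spec_collect_hits_py; infer_instance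

-- ===== CLAIM (what is proved, stated in full; the proofs are below) =====
def Claim_equal_collect_hits_py : Prop := ∀ (text : String) (patterns : List (String × Int)), Dom_collect_hits_py text patterns → Spec_collect_hits_py text patterns (collect_hits_py text patterns)

-- ===== LEMMAS AND PROOFS =====

-- membership in one substring bucket is exactly Python's 'q in text' for q of that length
theorem mem_pvSubs (text q : List Char) :
    q ∈ pvSubs text q.length ↔ PySem.Chars.isIn q text = true := by
  rw [← PySem.Chars.exists_prefix_drop_iff_isIn]
  unfold pvSubs
  rw [PySem.Set.mem_ofList]
  constructor
  · intro h
    rcases List.mem_map.1 h with ⟨i, _, hiq⟩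
    have hpre := List.take_prefix q.length (text.drop i)
    rw [hiq] at hpre
    exact ⟨i, hpre⟩
  · rintro ⟨j, hj⟩
    have hq : q <+: text.drop (min j text.length) := by
      by_cases hjn : j ≤ text.length
      · rwa [min_eq_left hjn]
      · rw [min_eq_right (by omega)]
        have : text.drop j = [] := List.drop_eq_nil_of_le (by omega)
        rw [this] at hj
        rw [List.drop_eq_nil_of_le (le_refl _)]
        exact hj
    have hlen : q.length ≤ (text.drop (min j text.length)).length := hq.length_le
    rw [List.length_drop] at hlen
    have hjn : min j text.length ≤ text.length := min_le_right _ _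
    refine List.mem_map.2 ⟨min j text.length, List.mem_range.2 (by omega), ?_⟩
    exact (List.prefix_iff_eq_take.1 hq).symm

-- every value the index stores under key L is pvSubs text L, and every pattern length is a key
theorem pvIndex_get?_of_mem (text : List Char) (pats : List (List Char))
    (d : PySem.Dict Nat (PySem.Set (List Char))) (q : List Char)
    (hd : ∀ L s, d.get? L = some s → s = pvSubs text L)
    (h : q.length ∈ pats.map List.length ∨ d.get? q.length = some (pvSubs text q.length)) :
    (pats.foldl
      (fun d p => if d.contains p.length then d else d.insert p.length (pvSubs text p.length))
      d).get? q.length = some (pvSubs text q.length) := by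
  induction pats generalizing d with
  | nil =>
    rcases h with h | h
    · simp at h
    · simpa using h
  | cons p ps ih =>
    simp only [List.foldl_cons]
    by_cases hc : d.contains p.length = true
    · rw [if_pos hc]
      refine ih d hd ?_
      rcases h with h | h
      · rw [List.map_cons] at h
        rcases List.mem_cons.1 h with he | hm
        · refine Or.inr ?_
          rcases hg : d.get? p.length with _ | t
          · exact absurd ((PySem.Dict.get?_eq_none_iff_contains d p.length).1 hg)
              (by simp [hc])
          · rw [he, hg, hd p.length t hg]
        · exact Or.inl hm
      · exact Or.inr h
    · rw [if_neg hc]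
      refine ih _ ?_ ?_
      · intro L s hs
        by_cases hL : L = p.length
        · subst hL
          rw [PySem.Dict.get?_insert_self] at hs
          exact (Option.some_inj.1 hs).symm
        · rw [PySem.Dict.get?_insert_of_ne _ _ hL] at hs
          exact hd L s hs
      · rcases h with h | h
        · rw [List.map_cons] at h
          rcases List.mem_cons.1 h with he | hm
          · exact Or.inr (by rw [he]; exact PySem.Dict.get?_insert_self ..)
          · exact Or.inl hm
        · by_cases hL : q.length = p.length
          · exact Or.inr (by rw [hL, PySem.Dict.get?_insert_self, ← hL])
          · exact Or.inr (by rw [PySem.Dict.get?_insert_of_ne _ _ hL]; exact h)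

-- the index lookup equals Python's 'pattern in text'
theorem index_lookup_eq_isIn (text : String) (patterns : List (String × Int)) (p : String)
    (hp : p ∈ patterns.map (fun pw => pw.1)) :
    ((pvIndex text.toList (patterns.map (fun pw => pw.1.toList))).getD
        p.toList.length PySem.Set.empty).contains p.toList
      = PySem.Str.isIn p text := by
  obtain ⟨pw, hpw, rfl⟩ := List.mem_map.1 hp
  have hget :
      (pvIndex text.toList (patterns.map (fun pw => pw.1.toList))).get? pw.1.toList.length
        = some (pvSubs text.toList pw.1.toList.length) := by
    refine pvIndex_get?_of_mem text.toList _ _ pw.1.toList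
      (fun L s hs => by rw [PySem.Dict.get?_empty] at hs; cases hs) (Or.inl ?_)
    rw [List.map_map]
    exact List.mem_map.2 ⟨pw, hpw, rfl⟩
  rw [PySem.Dict.getD_eq_get?_getD, hget]
  have hstr : PySem.Str.isIn pw.1 text = PySem.Chars.isIn pw.1.toList text.toList := by
    simp [PySem.Str.isIn]
  simp only [Option.getD_some]
  by_cases h : PySem.Chars.isIn pw.1.toList text.toList = true
  · rw [(PySem.Set.contains_iff _ _).2 ((mem_pvSubs text.toList pw.1.toList).2 h), hstr, h]
  · have hc : (pvSubs text.toList pw.1.toList.length).contains pw.1.toList = false :=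
      Bool.eq_false_iff.mpr
        (fun ht => h ((mem_pvSubs text.toList pw.1.toList).1 ((PySem.Set.contains_iff _ _).1 ht)))
    rw [hc, hstr, Bool.eq_false_iff.mpr h]

-- A's single fold equals filter-then-project, for any accumulator and condition
theorem foldA_eq (c : String × Int → Bool) (l : List (String × Int)) (h : List String) (t : Int) :
    l.foldl (fun (st : List String × Int) pw =>
        if c pw then (st.1 ++ [pw.1], st.2 + pw.2) else st) (h, t)
    = (h ++ (l.filter c).map (fun pw => pw.1),
       t + ((l.filter c).map (fun pw => pw.2)).sum) := by
  induction l generalizing h t with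
  | nil => simp
  | cons pw ps ih =>
    by_cases hc : c pw = true
    · simp [hc, ih, add_assoc]
    · simp [hc, ih]

-- ===== VERDICT (by name: the statement is the Claim_ definition above) =====
theorem collect_hits_py_spec : Claim_equal_collect_hits_py := by
  intro text patterns _
  unfold Spec_collect_hits_py
  have hfilter :
      patterns.filter
        (fun pw => ((pvIndex text.toList (patterns.map (fun pw => pw.1.toList))).getD
            pw.1.toList.length PySem.Set.empty).contains pw.1.toList)
      = patterns.filter (fun pw => PySem.Str.isIn pw.1 text) := by
    apply List.filter_congr
    intro pw hpw
    exact index_lookup_eq_isIn text patterns pw.1 (List.mem_map.2 ⟨pw, hpw, rfl⟩)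
  simp only [collect_hits_py, collect_hits_py_alt, hfilter]
  rw [foldA_eq (fun pw => PySem.Str.isIn pw.1 text)]
  simp
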